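-- pv_equiv track=rewrite | github.com/libardo667/worldweaver | ww_agent/src/loops/mail.py | _parse_draft_body
-- ===== SOURCE A (Python) =====
-- def _parse_draft_body(content: str) -> str:
--     lines = content.splitlines()
--     in_body = False
--     body_lines = []
--     for line in lines:
--         if in_body:
--             body_lines.append(line)
--         elif line.strip() == "":
--             in_body = True
--     return "\n".join(body_lines).strip()
-- ===== SOURCE B (Python) =====
-- def _parse_draft_body(content: str) -> str:
--     lines = content.splitlines()
--     i = 0
--     while i < len(lines) and lines[i].strip() != "":
--         i += 1
--     return "\n".join(lines[i + 1:]).strip()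
-- ===== Notes on version B (the rewrite author's own statement) =====
-- stated objective: simpler
-- what changed: Replaces the in_body flag and per-line accumulation with finding the index of the first blank line and slicing the tail lines[i+1:].
import Mathlib
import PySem

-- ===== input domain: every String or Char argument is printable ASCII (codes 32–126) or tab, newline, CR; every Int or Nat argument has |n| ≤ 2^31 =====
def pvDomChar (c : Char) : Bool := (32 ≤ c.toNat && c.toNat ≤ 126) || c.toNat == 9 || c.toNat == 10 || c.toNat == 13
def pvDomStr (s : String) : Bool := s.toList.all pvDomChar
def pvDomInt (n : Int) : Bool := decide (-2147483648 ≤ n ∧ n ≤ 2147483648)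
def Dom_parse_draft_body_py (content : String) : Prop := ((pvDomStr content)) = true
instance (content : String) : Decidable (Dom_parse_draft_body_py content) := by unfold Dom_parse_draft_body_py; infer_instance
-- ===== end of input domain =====

-- B replaces A's in_body flag and per-line accumulation with an index-then-slice
-- formulation (find the first blank line, join the tail); objective: simpler.


-- ===== PORT A =====
def pvStepA (s : Bool × List String) (line : String) : Bool × List String :=
  if s.1 then (s.1, s.2 ++ [line])
  else if PySem.Str.strip line = "" then (true, s.2)
  else s

def parse_draft_body_py (content : String) : String :=
  let lines := PySem.Str.splitlines content
  let st := lines.foldl pvStepA (false, [])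
  PySem.Str.strip (PySem.Str.join "\n" st.2)

-- ===== PORT B =====
-- the while loop: advance i until lines[i].strip() == "" or i = len(lines)
def pvFindBlank (lines : List String) (i : Nat) : Nat :=
  if h : i < lines.length then
    if PySem.Str.strip lines[i] ≠ "" then pvFindBlank lines (i + 1) else i
  else i
termination_by lines.length - i

def parse_draft_body_py_alt (content : String) : String :=
  let lines := PySem.Str.splitlines content
  let i := pvFindBlank lines 0
  PySem.Str.strip (PySem.Str.join "\n" (PySem.List.slice lines (some ((i : Int) + 1)) none))

-- ===== PRECONDITION & SPEC =====
def Spec_parse_draft_body_py (content : String) (out : String) : Prop := out = parse_draft_body_py_alt content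
instance (content : String) (out : String) : Decidable (Spec_parse_draft_body_py content out) := by unfold Spec_parse_draft_body_py; infer_instance

-- ===== CLAIM (what is proved, stated in full; the proofs are below) =====
def Claim_equal_parse_draft_body_py : Prop := ∀ (content : String), Dom_parse_draft_body_py content → Spec_parse_draft_body_py content (parse_draft_body_py content)

-- ===== LEMMAS AND PROOFS =====

-- list-level restatement of B's while loop: number of leading non-blank lines
def pvAux : List String → Nat
  | [] => 0
  | l :: rest => if PySem.Str.strip l ≠ "" then pvAux rest + 1 else 0

theorem pvFindBlank_eq (lines : List String) (i : Nat) (h : i ≤ lines.length) :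
    pvFindBlank lines i = i + pvAux (lines.drop i) := by
  induction i using pvFindBlank.induct lines with
  | case1 i h' hne ih =>
    rw [pvFindBlank]
    simp only [h', dif_pos]
    rw [ih (by omega)]
    rw [List.drop_eq_getElem_cons h']
    simp [pvAux, hne]
    omega
  | case2 i h' hb =>
    rw [pvFindBlank]
    simp only [h', dif_pos]
    rw [if_neg hb]
    rw [List.drop_eq_getElem_cons h']
    simp only [pvAux, hb]
    simp
  | case3 i h' =>
    rw [pvFindBlank]
    simp only [h']
    have : i = lines.length := by omega
    subst this
    simp [List.drop_length, pvAux]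

theorem foldA_true (ls : List String) (acc : List String) :
    ls.foldl pvStepA (true, acc) = (true, acc ++ ls) := by
  induction ls generalizing acc with
  | nil => simp
  | cons l rest ih => simp [pvStepA, ih]

theorem foldA_false (ls : List String) :
    (ls.foldl pvStepA (false, [])).2 = ls.drop (pvAux ls + 1) := by
  induction ls with
  | nil => simp
  | cons l rest ih =>
    by_cases hb : PySem.Str.strip l = ""
    · simp [pvStepA, hb, pvAux, foldA_true]
    · simp only [List.foldl_cons, pvStepA]
      rw [if_neg (by decide), if_neg hb, ih]
      simp [pvAux, hb, List.drop_succ_cons]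

-- ===== VERDICT (by name: the statement is the Claim_ definition above) =====
theorem parse_draft_body_py_spec : Claim_equal_parse_draft_body_py := by
  intro content _
  unfold Spec_parse_draft_body_py parse_draft_body_py parse_draft_body_py_alt
  simp only []
  set lines := PySem.Str.splitlines content with hl
  have hi : pvFindBlank lines 0 = pvAux lines := by
    simpa using pvFindBlank_eq lines 0 (by omega)
  rw [hi]
  have hs : PySem.List.slice lines (some ((pvAux lines : Int) + 1)) none
      = lines.drop (pvAux lines + 1) := by
    have := PySem.List.slice_from_natCast lines (pvAux lines + 1)
    simpa [Int.natCast_add] using this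
  rw [hs, foldA_false]
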